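-- pv_equiv track=rewrite | github.com/ao561/leetcode | 1817-calculate-money-in-leetcode-bank/calculate-money-in-leetcode-bank.py | totalMoney
-- ===== SOURCE A (Python) =====
-- def totalMoney(n: int) -> int:
--     day = 1
--     start = 1
--     total = 0
--     amount = 1
--
--     while n > 0:
--         if day % 8 == 0:
--             start += 1
--             amount = start
--             day = 1
--
--         total += amount
--         amount += 1
--         day += 1
--         n -= 1
--
--     return total
-- ===== SOURCE B (Python) =====
-- def totalMoney(n: int) -> int:
--     # closed form: w full weeks (week i, 0-based, deposits 28 + 7*i) plus r leftover days
--     m = max(n, 0)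
--     w, r = divmod(m, 7)
--     return 28 * w + 7 * (w * (w - 1) // 2) + r * w + r * (r + 1) // 2
-- ===== Notes on version B (the rewrite author's own statement) =====
-- stated objective: faster
-- what changed: Replaces the day-by-day simulation loop with an O(1) closed form: arithmetic-series sum over full weeks plus the partial last week.
import Mathlib
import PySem

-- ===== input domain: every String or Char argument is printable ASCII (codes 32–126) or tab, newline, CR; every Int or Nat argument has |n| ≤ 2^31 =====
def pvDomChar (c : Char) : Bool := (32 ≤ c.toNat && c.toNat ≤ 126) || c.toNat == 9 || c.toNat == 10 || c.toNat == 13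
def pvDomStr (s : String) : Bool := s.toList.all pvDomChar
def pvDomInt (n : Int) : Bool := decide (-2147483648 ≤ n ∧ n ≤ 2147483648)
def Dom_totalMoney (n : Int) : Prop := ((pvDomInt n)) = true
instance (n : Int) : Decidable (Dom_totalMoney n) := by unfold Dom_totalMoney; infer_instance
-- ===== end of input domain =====

-- B replaces A's day-by-day simulation loop with an O(1) closed form
-- (arithmetic series over full weeks plus the partial last week).

-- ===== PORT A =====
-- A's while loop runs exactly n.toNat times (n > 0 test, n -= 1 each pass);
-- state (day, start, total, amount) is carried unchanged.
def totalMoneyLoop : Nat → Int → Int → Int → Int → Int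
  | 0, _, _, total, _ => total
  | k+1, day, start, total, amount =>
    let s : Int × Int × Int :=
      if PySem.Int.mod day 8 = 0 then (1, start + 1, start + 1) else (day, start, amount)
    totalMoneyLoop k (s.1 + 1) s.2.1 (total + s.2.2) (s.2.2 + 1)

def totalMoney (n : Int) : Int := totalMoneyLoop n.toNat 1 1 0 1

-- ===== PORT B =====
def totalMoney_alt (n : Int) : Int :=
  let m := max n 0
  let w := PySem.Int.floordiv m 7
  let r := PySem.Int.mod m 7
  28 * w + 7 * PySem.Int.floordiv (w * (w - 1)) 2 + r * w + PySem.Int.floordiv (r * (r + 1)) 2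

-- ===== PRECONDITION & SPEC =====
def Spec_totalMoney (n : Int) (out : Int) : Prop := out = totalMoney_alt n
instance (n : Int) (out : Int) : Decidable (Spec_totalMoney n out) := by unfold Spec_totalMoney; infer_instance

-- ===== CLAIM (what is proved, stated in full; the proofs are below) =====
def Claim_equal_totalMoney : Prop := ∀ (n : Int), Dom_totalMoney n → Spec_totalMoney n (totalMoney n)

-- ===== LEMMAS AND PROOFS =====

-- From the "day = 8" state the reset branch fires, which is the same as restarting
-- a fresh week with start+1.
theorem totalMoneyLoop_reset (m : Nat) (s total a : Int) :
    totalMoneyLoop m 8 s total a = totalMoneyLoop m 1 (s + 1) total (s + 1) := by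
  cases m with
  | zero => rfl
  | succ k => simp [totalMoneyLoop, PySem.Int.mod]

-- Doubled closed form for m days starting a fresh week with start s (no divisions).
def pvE (m : Nat) (s : Int) : Int :=
  let w : Int := (m / 7 : Nat)
  let r : Int := (m % 7 : Nat)
  14 * w * s + 42 * w + 7 * w * (w - 1) + 2 * r * (s + w) + r * (r - 1)

theorem totalMoneyLoop_step (k : Nat) (d s total a : Int) (h : ¬ (8:Int) ∣ d) :
    totalMoneyLoop (k + 1) d s total a = totalMoneyLoop k (d + 1) s (total + a) (a + 1) := by
  simp [totalMoneyLoop, h]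

theorem totalMoneyLoop_closed (m : Nat) : ∀ (s total : Int),
    2 * totalMoneyLoop m 1 s total s = 2 * total + pvE m s := by
  induction m using Nat.strong_induction_on with
  | _ m ih =>
    intro s total
    by_cases h : m < 7
    · interval_cases m <;>
        simp [totalMoneyLoop, PySem.Int.mod, pvE] <;> ring
    · obtain ⟨k, rfl⟩ : ∃ k, m = k + 7 := ⟨m - 7, by omega⟩
      have h7 : totalMoneyLoop (k + 7) 1 s total s
          = totalMoneyLoop k 1 (s + 1) (total + 7 * s + 21) (s + 1) := by
        calc totalMoneyLoop (k + 7) 1 s total s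
          _ = totalMoneyLoop (k + 6) (1 + 1) s (total + s) (s + 1) :=
              totalMoneyLoop_step (k + 6) (1) s (total) (s) (by decide)
          _ = totalMoneyLoop (k + 5) (1 + 1 + 1) s (total + s + (s + 1)) (s + 1 + 1) :=
              totalMoneyLoop_step (k + 5) (1 + 1) s (total + s) (s + 1) (by decide)
          _ = totalMoneyLoop (k + 4) (1 + 1 + 1 + 1) s (total + s + (s + 1) + (s + 1 + 1)) (s + 1 + 1 + 1) :=
              totalMoneyLoop_step (k + 4) (1 + 1 + 1) s (total + s + (s + 1)) (s + 1 + 1) (by decide)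
          _ = totalMoneyLoop (k + 3) (1 + 1 + 1 + 1 + 1) s (total + s + (s + 1) + (s + 1 + 1) + (s + 1 + 1 + 1)) (s + 1 + 1 + 1 + 1) :=
              totalMoneyLoop_step (k + 3) (1 + 1 + 1 + 1) s (total + s + (s + 1) + (s + 1 + 1)) (s + 1 + 1 + 1) (by decide)
          _ = totalMoneyLoop (k + 2) (1 + 1 + 1 + 1 + 1 + 1) s (total + s + (s + 1) + (s + 1 + 1) + (s + 1 + 1 + 1) + (s + 1 + 1 + 1 + 1)) (s + 1 + 1 + 1 + 1 + 1) :=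
              totalMoneyLoop_step (k + 2) (1 + 1 + 1 + 1 + 1) s (total + s + (s + 1) + (s + 1 + 1) + (s + 1 + 1 + 1)) (s + 1 + 1 + 1 + 1) (by decide)
          _ = totalMoneyLoop (k + 1) (1 + 1 + 1 + 1 + 1 + 1 + 1) s (total + s + (s + 1) + (s + 1 + 1) + (s + 1 + 1 + 1) + (s + 1 + 1 + 1 + 1) + (s + 1 + 1 + 1 + 1 + 1)) (s + 1 + 1 + 1 + 1 + 1 + 1) :=
              totalMoneyLoop_step (k + 1) (1 + 1 + 1 + 1 + 1 + 1) s (total + s + (s + 1) + (s + 1 + 1) + (s + 1 + 1 + 1) + (s + 1 + 1 + 1 + 1)) (s + 1 + 1 + 1 + 1 + 1) (by decide)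
          _ = totalMoneyLoop k (1 + 1 + 1 + 1 + 1 + 1 + 1 + 1) s (total + s + (s + 1) + (s + 1 + 1) + (s + 1 + 1 + 1) + (s + 1 + 1 + 1 + 1) + (s + 1 + 1 + 1 + 1 + 1) + (s + 1 + 1 + 1 + 1 + 1 + 1)) (s + 1 + 1 + 1 + 1 + 1 + 1 + 1) :=
              totalMoneyLoop_step k (1 + 1 + 1 + 1 + 1 + 1 + 1) s (total + s + (s + 1) + (s + 1 + 1) + (s + 1 + 1 + 1) + (s + 1 + 1 + 1 + 1) + (s + 1 + 1 + 1 + 1 + 1)) (s + 1 + 1 + 1 + 1 + 1 + 1) (by decide)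
          _ = totalMoneyLoop k 1 (s + 1) (total + s + (s + 1) + (s + 1 + 1) + (s + 1 + 1 + 1) + (s + 1 + 1 + 1 + 1) + (s + 1 + 1 + 1 + 1 + 1) + (s + 1 + 1 + 1 + 1 + 1 + 1)) (s + 1) :=
              totalMoneyLoop_reset k s (total + s + (s + 1) + (s + 1 + 1) + (s + 1 + 1 + 1) + (s + 1 + 1 + 1 + 1) + (s + 1 + 1 + 1 + 1 + 1) + (s + 1 + 1 + 1 + 1 + 1 + 1)) (s + 1 + 1 + 1 + 1 + 1 + 1 + 1)
          _ = totalMoneyLoop k 1 (s + 1) (total + 7 * s + 21) (s + 1) := by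
              rw [show (total + s + (s + 1) + (s + 1 + 1) + (s + 1 + 1 + 1) + (s + 1 + 1 + 1 + 1) + (s + 1 + 1 + 1 + 1 + 1) + (s + 1 + 1 + 1 + 1 + 1 + 1) : Int) = total + 7 * s + 21 from by ring]
      rw [h7, ih k (by omega)]
      have hw : (k + 7) / 7 = k / 7 + 1 := by omega
      have hr : (k + 7) % 7 = k % 7 := by omega
      simp only [pvE, hw, hr]
      push_cast
      ring

theorem two_dvd_mul_pred (w : Int) : (2 : Int) ∣ w * (w - 1) := by
  have h := Int.even_mul_succ_self (w - 1)
  have he : (w - 1) * (w - 1 + 1) = w * (w - 1) := by ring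
  rw [he] at h
  exact h.two_dvd

theorem floordiv_two_exact (x : Int) (h : (2 : Int) ∣ x) :
    2 * PySem.Int.floordiv x 2 = x := by
  have h1 := PySem.Int.floordiv_mul_add_mod x 2
  have h2 : PySem.Int.mod x 2 = 0 := (PySem.Int.mod_eq_zero_iff_dvd x 2).mpr h
  rw [h2] at h1
  linarith

theorem totalMoney_eq_alt (n : Int) : totalMoney n = totalMoney_alt n := by
  unfold totalMoney totalMoney_alt
  by_cases hn : n ≤ 0
  · have h0 : n.toNat = 0 := by omega
    have hm : max n 0 = 0 := by omega
    simp [h0, hm, totalMoneyLoop, PySem.Int.floordiv, PySem.Int.mod, Int.fdiv, Int.fmod]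
  · have hm : max n 0 = ((n.toNat : Nat) : Int) := by omega
    have hw7 : PySem.Int.floordiv ((n.toNat : Nat) : Int) 7 = ((n.toNat / 7 : Nat) : Int) := by
      exact_mod_cast PySem.Int.floordiv_natCast n.toNat 7
    have hr7 : PySem.Int.mod ((n.toNat : Nat) : Int) 7 = ((n.toNat % 7 : Nat) : Int) := by
      exact_mod_cast PySem.Int.mod_natCast n.toNat 7
    simp only [hm, hw7, hr7]
    set w : Int := ((n.toNat / 7 : Nat) : Int) with hwdef
    set r : Int := ((n.toNat % 7 : Nat) : Int) with hrdef
    have hmain := totalMoneyLoop_closed n.toNat 1 0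
    have hd1 := floordiv_two_exact (w * (w - 1)) (two_dvd_mul_pred w)
    have hd2 := floordiv_two_exact (r * (r + 1)) (by
      have := two_dvd_mul_pred (r + 1)
      simpa [mul_comm] using this)
    have hE : pvE n.toNat 1 = 14 * w + 42 * w + 7 * w * (w - 1) + 2 * r * (1 + w) + r * (r - 1) := by
      simp [pvE, hwdef, hrdef]
    nlinarith [hmain, hd1, hd2, hE]

-- ===== VERDICT (by name: the statement is the Claim_ definition above) =====
theorem totalMoney_spec : Claim_equal_totalMoney := by
  intro n _
  exact totalMoney_eq_alt n
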